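-- pv_equiv track=rewrite | github.com/ihgazni2/dlixhict-didactic | xdict/elist.py | remove_seqs
-- ===== SOURCE A (Python) =====
-- import copy
--
-- def remove_seqs(ol,value,seqs,**kwargs):
--     '''
--         from xdict.elist import *
--         ol = [1,'a',3,'a',5,'a',6,'a']
--         id(ol)
--         new = remove_seqs(ol,'a',{1,3})
--         ol
--         new
--         id(ol)
--         id(new)
--         ####
--         ol = [1,'a',3,'a',5,'a',6,'a']
--         id(ol)
--         rslt = remove_seqs(ol,'a',{1,3},mode="original")
--         ol
--         rslt
--         id(ol)
--         id(rslt)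
--     '''
--     if('mode' in kwargs):
--         mode = kwargs["mode"]
--     else:
--         mode = "new"
--     seqs = list(seqs)
--     new = []
--     length = ol.__len__()
--     cpol = copy.deepcopy(ol)
--     seq = -1
--     for i in range(0,length):
--         if(cpol[i]==value):
--             seq = seq + 1
--             if(seq in seqs):
--                 pass
--             else:
--                 new.append(cpol[i])
--         else:
--             new.append(cpol[i])
--     if(mode == "new"):
--         return(new)
--     else:
--         ol.clear()
--         ol.extend(new)
--         return(ol)
-- ===== SOURCE B (Python) =====
-- import copy
--
-- def remove_seqs(ol, value, seqs, **kwargs):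
--     mode = kwargs.get("mode", "new")
--     cpol = copy.deepcopy(ol)
--     positions = [i for i, x in enumerate(cpol) if x == value]
--     seqs = list(seqs)
--     drop = {positions[k] for k in range(len(positions)) if k in seqs}
--     new = [x for i, x in enumerate(cpol) if i not in drop]
--     if mode == "new":
--         return new
--     ol.clear()
--     ol.extend(new)
--     return ol
-- ===== Notes on version B (the rewrite author's own statement) =====
-- stated objective: alternative
-- what changed: A's single loop with a mutable occurrence counter and conditional appends is replaced by a three-stage pipeline: collect the indices of value occurrences, build the set of indices whose ordinal is in seqs, then filter the list by index.
import Mathlib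
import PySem

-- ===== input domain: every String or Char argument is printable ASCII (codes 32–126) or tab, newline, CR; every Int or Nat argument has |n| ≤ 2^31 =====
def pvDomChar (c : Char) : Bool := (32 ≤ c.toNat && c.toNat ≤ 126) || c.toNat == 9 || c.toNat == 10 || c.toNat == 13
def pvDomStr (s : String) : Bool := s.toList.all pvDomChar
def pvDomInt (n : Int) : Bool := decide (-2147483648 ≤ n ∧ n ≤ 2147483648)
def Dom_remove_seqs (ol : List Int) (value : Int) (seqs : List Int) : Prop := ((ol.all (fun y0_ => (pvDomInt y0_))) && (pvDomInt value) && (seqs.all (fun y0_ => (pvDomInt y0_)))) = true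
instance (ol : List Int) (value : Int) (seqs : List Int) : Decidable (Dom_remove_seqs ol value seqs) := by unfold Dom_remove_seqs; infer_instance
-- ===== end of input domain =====

-- B re-decomposes A's single counting loop into positions / drop-set / filter comprehensions
-- (objective: alternative decomposition, same asymptotic cost). Ports cover the default
-- mode="new" (the **kwargs 'mode' parameter is outside the fixed signature); with it A and B
-- both leave ol unmutated and return a fresh list.

-- ===== PORT A =====
-- one iteration of A's for-loop body: state = (seq, new)
def removeSeqsStep (value : Int) (seqs : List Int) (st : Int × List Int) (x : Int) : Int × List Int :=
  if x = value then
    let seq := st.1 + 1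
    if seq ∈ seqs then (seq, st.2) else (seq, st.2 ++ [x])
  else (st.1, st.2 ++ [x])

def remove_seqs (ol : List Int) (value : Int) (seqs : List Int) : List Int :=
  let length := PySem.List.len ol
  let cpol := ol          -- copy.deepcopy(ol): same list value
  ((PySem.List.pyRange 0 length).foldl
    (fun st i => removeSeqsStep value seqs st (PySem.List.pyGetD cpol i 0)) (-1, [])).2

-- ===== PORT B =====
-- positions = [i for i,x in enumerate(cpol) if x == value]
def matchPositions (value : Int) (cpol : List Int) : List Int :=
  ((PySem.List.enumerate cpol).filter (fun p => p.2 == value)).map (fun p => p.1)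

-- drop = {positions[k] for k in range(len(positions)) if k in seqs}
def dropList (value : Int) (seqs : List Int) (cpol : List Int) : List Int :=
  let positions := matchPositions value cpol
  ((PySem.List.pyRange 0 (PySem.List.len positions)).filter (fun k => decide (k ∈ seqs))).map
    (fun k => PySem.List.pyGetD positions k 0)

def remove_seqs_alt (ol : List Int) (value : Int) (seqs : List Int) : List Int :=
  let cpol := ol          -- copy.deepcopy(ol): same list value
  let drop : PySem.Set Int := PySem.Set.ofList (dropList value seqs cpol)
  ((PySem.List.enumerate cpol).filter (fun p => !(decide (p.1 ∈ drop)))).map (fun p => p.2)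

-- ===== PRECONDITION & SPEC =====
def Spec_remove_seqs (ol : List Int) (value : Int) (seqs : List Int) (out : List Int) : Prop := out = remove_seqs_alt ol value seqs
instance (ol : List Int) (value : Int) (seqs : List Int) (out : List Int) : Decidable (Spec_remove_seqs ol value seqs out) := by unfold Spec_remove_seqs; infer_instance

-- ===== CLAIM (what is proved, stated in full; the proofs are below) =====
def Claim_equal_remove_seqs : Prop := ∀ (ol : List Int) (value : Int) (seqs : List Int), Dom_remove_seqs ol value seqs → Spec_remove_seqs ol value seqs (remove_seqs ol value seqs)

-- ===== LEMMAS AND PROOFS =====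

-- common recursive characterisation: keep every element, except occurrences of `value`
-- whose ordinal (encoded by shifting seqs as the list is consumed) lies in seqs
def core (value : Int) : List Int → List Int → List Int
  | _, [] => []
  | seqs, x :: xs =>
    if x = value then
      (if (0:Int) ∈ seqs then [] else [x]) ++ core value (seqs.map (· - 1)) xs
    else x :: core value seqs xs

lemma mem_map_sub (s : List Int) (a t : Int) : a ∈ s.map (· - t) ↔ a + t ∈ s := by
  simp [List.mem_map, sub_eq_iff_eq_add]

lemma map_sub_sub (s : List Int) (t u : Int) :
    (s.map (· - t)).map (· - u) = s.map (· - (t + u)) := by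
  rw [List.map_map]; apply List.map_congr_left; intro a _; simp [Function.comp]; ring

-- ---- A equals core ----

lemma A_fold (value : Int) (seqs : List Int) :
    ∀ (xs : List Int) (c : Int) (acc : List Int),
      (xs.foldl (removeSeqsStep value seqs) (c, acc)).2
        = acc ++ core value (seqs.map (· - (c + 1))) xs := by
  intro xs
  induction xs with
  | nil => intro c acc; simp [core]
  | cons x xs ih =>
    intro c acc
    by_cases hx : x = value
    · by_cases hs : c + 1 ∈ seqs
      · have h0 : (0:Int) ∈ seqs.map (· - (c + 1)) := by
          rw [mem_map_sub]; simpa using hs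
        simp only [List.foldl_cons, removeSeqsStep, hx, if_pos hs, ih, core,
          if_pos h0, map_sub_sub]
        norm_num
      · have h0 : (0:Int) ∉ seqs.map (· - (c + 1)) := by
          rw [mem_map_sub]; simpa using hs
        simp only [List.foldl_cons, removeSeqsStep, hx, if_neg hs, ih, core,
          if_neg h0, map_sub_sub]
        norm_num
    · simp only [List.foldl_cons, removeSeqsStep, if_neg hx, ih, core]
      simp

lemma A_eq_core (ol : List Int) (value : Int) (seqs : List Int) :
    remove_seqs ol value seqs = core value seqs ol := by
  show ((PySem.List.pyRange 0 (PySem.List.len ol)).foldl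
    (fun st i => removeSeqsStep value seqs st (PySem.List.pyGetD ol i 0)) (-1, [])).2
      = core value seqs ol
  rw [show (PySem.List.pyRange 0 (PySem.List.len ol)).foldl
      (fun st i => removeSeqsStep value seqs st (PySem.List.pyGetD ol i 0)) ((-1 : Int), ([] : List Int))
      = (List.drop (0:Int).toNat ol).foldl (removeSeqsStep value seqs) ((-1 : Int), ([] : List Int)) from
    PySem.List.foldl_pyRange_pyGetD ol 0 (removeSeqsStep value seqs) _ (le_refl 0)]
  simp only [Int.toNat_zero, List.drop_zero]
  rw [A_fold]
  simp

-- ---- B equals core ----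

lemma enumerate_eq_map (xs : List Int) :
    ∀ s : Int, PySem.List.enumerate xs s
      = (PySem.List.enumerate xs 0).map (fun p => (p.1 + s, p.2)) := by
  induction xs with
  | nil => intro s; simp [PySem.List.enumerate]
  | cons x xs ih =>
    intro s
    simp only [PySem.List.enumerate]
    rw [ih (s + 1), ih (0 + 1)]
    simp only [List.map_cons, List.map_map, zero_add]
    congr 1
    apply List.map_congr_left
    intro p _
    simp [Function.comp]
    ring

lemma enumerate_cons (x : Int) (xs : List Int) :
    PySem.List.enumerate (x :: xs)
      = (0, x) :: (PySem.List.enumerate xs).map (fun p => (p.1 + 1, p.2)) := by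
  show PySem.List.enumerate (x :: xs) 0 = _
  simp only [PySem.List.enumerate]
  rw [enumerate_eq_map xs (0 + 1)]
  norm_num

lemma enum_fst_nonneg (xs : List Int) : ∀ p ∈ PySem.List.enumerate xs 0, 0 ≤ p.1 := by
  induction xs with
  | nil => simp [PySem.List.enumerate]
  | cons x xs ih =>
    intro p hp
    rw [show PySem.List.enumerate (x :: xs) 0 = PySem.List.enumerate (x :: xs) from rfl,
      enumerate_cons] at hp
    simp only [List.mem_cons, List.mem_map] at hp
    rcases hp with rfl | ⟨q, hq, rfl⟩
    · simp
    · have := ih q hq; simp; omega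

lemma pos_cons (value x : Int) (xs : List Int) :
    matchPositions value (x :: xs)
      = if x = value then 0 :: (matchPositions value xs).map (· + 1)
        else (matchPositions value xs).map (· + 1) := by
  unfold matchPositions
  rw [enumerate_cons]
  by_cases hx : x = value
  · simp only [hx, if_pos, beq_self_eq_true, List.filter_cons, List.filter_map, List.map_cons,
      List.map_map]
    rfl
  · simp only [hx, beq_iff_eq, List.filter_cons, List.filter_map, List.map_map, if_false]
    rfl

lemma pos_nonneg (value : Int) (xs : List Int) : ∀ i ∈ matchPositions value xs, 0 ≤ i := by
  intro i hi
  unfold matchPositions at hi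
  rcases List.mem_map.1 hi with ⟨p, hp, rfl⟩
  exact enum_fst_nonneg xs p (List.mem_filter.1 hp).1

-- the drop-set pipeline over an arbitrary positions list
def dlOf (ps sq : List Int) : List Int :=
  ((PySem.List.pyRange 0 (PySem.List.len ps)).filter (fun k => decide (k ∈ sq))).map
    (fun k => PySem.List.pyGetD ps k 0)

lemma dropList_eq (value : Int) (sq xs : List Int) :
    dropList value sq xs = dlOf (matchPositions value xs) sq := rfl

lemma dlOf_nat (ps sq : List Int) :
    dlOf ps sq = ((List.range ps.length).filter (fun k : Nat => decide ((k:Int) ∈ sq))).map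
      (fun k : Nat => ps.getD k 0) := by
  unfold dlOf PySem.List.len
  rw [PySem.List.pyRange_zero_natCast, List.filter_map, List.map_map]
  apply List.map_congr_left
  intro k _
  simp [Function.comp, PySem.List.pyGetD_natCast]

lemma getD_map_add_one (ps : List Int) (k : Nat) (h : k < ps.length) :
    (ps.map (· + 1)).getD k 0 = ps.getD k 0 + 1 := by
  rw [List.getD_eq_getElem _ _ (by simpa using h), List.getD_eq_getElem _ _ h, List.getElem_map]

lemma dlOf_map_add_one (ps sq : List Int) :
    dlOf (ps.map (· + 1)) sq = (dlOf ps sq).map (· + 1) := by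
  rw [dlOf_nat, dlOf_nat, List.length_map, List.map_map]
  apply List.map_congr_left
  intro k hk
  have hkn : k < ps.length := List.mem_range.1 (List.mem_filter.1 hk).1
  simp only [Function.comp]
  exact getD_map_add_one ps k hkn

lemma dlOf_cons_zero (ps sq : List Int) :
    dlOf (0 :: ps.map (· + 1)) sq
      = (if (0:Int) ∈ sq then [(0:Int)] else []) ++ (dlOf ps (sq.map (· - 1))).map (· + 1) := by
  rw [dlOf_nat, dlOf_nat]
  simp only [List.length_cons, List.length_map]
  rw [List.range_succ_eq_map, List.filter_cons]
  have hpred : ∀ k ∈ List.range ps.length,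
      (decide (((Nat.succ k : Nat):Int) ∈ sq)) = decide ((k:Int) ∈ sq.map (· - 1)) := by
    intro k _
    have h1 : (((Nat.succ k : Nat):Int)) = (k:Int) + 1 := by push_cast; ring
    have h2 : ((k:Int) ∈ sq.map (· - 1)) ↔ (k:Int) + 1 ∈ sq := mem_map_sub sq _ 1
    rw [h1]
    simp [h2]
  have htail :
      ((List.range ps.length).map Nat.succ).filter (fun k : Nat => decide ((k:Int) ∈ sq))
        = ((List.range ps.length).filter (fun k : Nat => decide ((k:Int) ∈ sq.map (· - 1)))).map Nat.succ := by
    rw [List.filter_map]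
    congr 1
    apply List.filter_congr
    intro k hk
    simpa [Function.comp] using hpred k hk
  have hmap :
      (((List.range ps.length).filter (fun k : Nat => decide ((k:Int) ∈ sq.map (· - 1)))).map Nat.succ).map
          (fun k : Nat => (0 :: ps.map (· + 1)).getD k 0)
        = (((List.range ps.length).filter (fun k : Nat => decide ((k:Int) ∈ sq.map (· - 1)))).map
            (fun k : Nat => ps.getD k 0)).map (· + 1) := by
    rw [List.map_map, List.map_map]
    apply List.map_congr_left
    intro k hk
    have hkn : k < ps.length := List.mem_range.1 (List.mem_filter.1 hk).1
    simp only [Function.comp]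
    rw [show (0 :: ps.map (· + 1)).getD (Nat.succ k) 0 = (ps.map (· + 1)).getD k 0 from rfl,
      getD_map_add_one ps k hkn]
  by_cases h0 : (0:Int) ∈ sq
  · simp only [Nat.cast_zero, h0, decide_true, if_pos, List.map_cons, htail, hmap]
    simp
  · simp only [Nat.cast_zero, h0, decide_false, if_neg, Bool.false_eq_true, not_false_iff,
      htail, hmap]
    simp

lemma dl_nonneg (value : Int) (sq xs : List Int) : ∀ d ∈ dropList value sq xs, 0 ≤ d := by
  intro d hd
  rw [dropList_eq, dlOf_nat] at hd
  rcases List.mem_map.1 hd with ⟨k, hk, rfl⟩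
  have hkn : k < (matchPositions value xs).length := List.mem_range.1 (List.mem_filter.1 hk).1
  rw [List.getD_eq_getElem _ _ hkn]
  exact pos_nonneg value xs _ (List.getElem_mem hkn)

lemma dl_cons (value x : Int) (xs seqs : List Int) :
    dropList value seqs (x :: xs)
      = if x = value then
          (if (0:Int) ∈ seqs then [(0:Int)] else [])
            ++ (dropList value (seqs.map (· - 1)) xs).map (· + 1)
        else (dropList value seqs xs).map (· + 1) := by
  rw [dropList_eq, pos_cons]
  by_cases hx : x = value
  · simp only [hx, if_pos]
    rw [dlOf_cons_zero, dropList_eq]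
  · simp only [hx, if_neg, not_false_iff]
    rw [dlOf_map_add_one, dropList_eq]

lemma B_cons (value x : Int) (xs seqs : List Int) :
    remove_seqs_alt (x :: xs) value seqs
      = if x = value then
          (if (0:Int) ∈ seqs then [] else [x]) ++ remove_seqs_alt xs value (seqs.map (· - 1))
        else x :: remove_seqs_alt xs value seqs := by
  show ((PySem.List.enumerate (x :: xs)).filter
      (fun p => !(decide (p.1 ∈ PySem.Set.ofList (dropList value seqs (x :: xs)))))).map (fun p => p.2) = _
  rw [enumerate_cons, List.filter_cons]
  by_cases hx : x = value
  · -- head membership: 0 ∈ drop ↔ 0 ∈ seqs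
    have hmem0 : ((0:Int) ∈ PySem.Set.ofList (dropList value seqs (x :: xs))) ↔ (0:Int) ∈ seqs := by
      rw [PySem.Set.mem_ofList, dl_cons, if_pos hx]
      constructor
      · intro h
        rcases List.mem_append.1 h with h | h
        · by_cases h0 : (0:Int) ∈ seqs
          · exact h0
          · simp [h0] at h
        · rcases List.mem_map.1 h with ⟨d, hd, hd0⟩
          have := dl_nonneg value (seqs.map (· - 1)) xs d hd
          omega
      · intro h; exact List.mem_append.2 (Or.inl (by simp [h]))
    have htailpred : ∀ p ∈ PySem.List.enumerate xs,
        (!(decide ((p.1 + 1 : Int) ∈ PySem.Set.ofList (dropList value seqs (x :: xs)))))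
          = (!(decide (p.1 ∈ PySem.Set.ofList (dropList value (seqs.map (· - 1)) xs)))) := by
      intro p hp
      have hp0 : 0 ≤ p.1 := enum_fst_nonneg xs p hp
      have : ((p.1 + 1 : Int) ∈ PySem.Set.ofList (dropList value seqs (x :: xs)))
          ↔ (p.1 ∈ PySem.Set.ofList (dropList value (seqs.map (· - 1)) xs)) := by
        rw [PySem.Set.mem_ofList, PySem.Set.mem_ofList, dl_cons, if_pos hx]
        constructor
        · intro h
          rcases List.mem_append.1 h with h | h
          · by_cases h0 : (0:Int) ∈ seqs
            · simp [h0] at h; omega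
            · simp [h0] at h
          · rcases List.mem_map.1 h with ⟨d, hd, hd1⟩
            have : d = p.1 := by omega
            simpa [this] using hd
        · intro h
          exact List.mem_append.2 (Or.inr (List.mem_map.2 ⟨p.1, h, rfl⟩))
      simp [this]
    rw [List.filter_map]
    rw [show ((fun p : Int × Int => !(decide (p.1 ∈ PySem.Set.ofList (dropList value seqs (x :: xs)))))
          ∘ (fun p : Int × Int => (p.1 + 1, p.2)))
        = fun p : Int × Int => !(decide ((p.1 + 1 : Int) ∈ PySem.Set.ofList (dropList value seqs (x :: xs)))) from rfl]
    rw [List.filter_congr htailpred]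
    by_cases h0 : (0:Int) ∈ seqs
    · have : (!(decide ((0:Int) ∈ PySem.Set.ofList (dropList value seqs (x :: xs))))) = false := by
        simp [hmem0, h0]
      rw [this, if_neg Bool.false_ne_true, List.map_map, if_pos hx, if_pos h0]
      rfl
    · have : (!(decide ((0:Int) ∈ PySem.Set.ofList (dropList value seqs (x :: xs))))) = true := by
        simp [hmem0, h0]
      rw [this, if_pos rfl, List.map_cons, List.map_map, if_pos hx, if_neg h0]
      rfl
  · have hnot : ∀ a : Int, 0 ≤ a → (a ∈ PySem.Set.ofList (dropList value seqs (x :: xs))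
        ↔ a - 1 ∈ PySem.Set.ofList (dropList value seqs xs)) := by
      intro a _
      rw [PySem.Set.mem_ofList, PySem.Set.mem_ofList, dl_cons, if_neg hx]
      constructor
      · intro h; rcases List.mem_map.1 h with ⟨d, hd, hd1⟩
        have : d = a - 1 := by omega
        simpa [this] using hd
      · intro h; exact List.mem_map.2 ⟨a - 1, h, by ring⟩
    have hmem0 : ((0:Int) ∈ PySem.Set.ofList (dropList value seqs (x :: xs))) = False := by
      simp only [eq_iff_iff, iff_false]
      intro h
      rw [PySem.Set.mem_ofList, dl_cons, if_neg hx] at h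
      rcases List.mem_map.1 h with ⟨d, hd, hd1⟩
      have := dl_nonneg value seqs xs d hd
      omega
    have htailpred : ∀ p ∈ PySem.List.enumerate xs,
        (!(decide ((p.1 + 1 : Int) ∈ PySem.Set.ofList (dropList value seqs (x :: xs)))))
          = (!(decide (p.1 ∈ PySem.Set.ofList (dropList value seqs xs)))) := by
      intro p hp
      have hp0 : 0 ≤ p.1 := enum_fst_nonneg xs p hp
      have := hnot (p.1 + 1) (by omega)
      simp only [add_sub_cancel_right] at this
      simp [this]
    rw [List.filter_map]
    rw [show ((fun p : Int × Int => !(decide (p.1 ∈ PySem.Set.ofList (dropList value seqs (x :: xs)))))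
          ∘ (fun p : Int × Int => (p.1 + 1, p.2)))
        = fun p : Int × Int => !(decide ((p.1 + 1 : Int) ∈ PySem.Set.ofList (dropList value seqs (x :: xs)))) from rfl]
    rw [List.filter_congr htailpred]
    have : (!(decide ((0:Int) ∈ PySem.Set.ofList (dropList value seqs (x :: xs))))) = true := by
      simp [hmem0]
    rw [this, if_pos rfl, List.map_cons, List.map_map, if_neg hx]
    rfl

lemma B_eq_core (value : Int) :
    ∀ (ol seqs : List Int), remove_seqs_alt ol value seqs = core value seqs ol := by
  intro ol
  induction ol with
  | nil => intro seqs; rfl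
  | cons x xs ih =>
    intro seqs
    rw [B_cons]
    by_cases hx : x = value
    · simp only [hx, if_pos, core, ih]
    · simp only [hx, if_neg, not_false_iff, core, ih]

-- ===== VERDICT (by name: the statement is the Claim_ definition above) =====
theorem remove_seqs_spec : Claim_equal_remove_seqs := by
  intro ol value seqs _
  unfold Spec_remove_seqs
  rw [A_eq_core, B_eq_core]
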